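-- pv_equiv track=rewrite | github.com/iltoga/BusinessSuite | core/utils/passport_ocr.py | count_inaccuracy
-- ===== SOURCE A (Python) =====
-- def count_inaccuracy(extracted_mrz, actual_mrz):
--     """
--     This count the number of discrepency of characters between two MRZ dictionaries
--     Return:
--     - true_negative: number of discrepency of characters
--     """
--     true_negative = 0
--     for key in actual_mrz.keys():
--         if extracted_mrz[key] == actual_mrz[key]:
--             true_negative += 0
--         else:
--             size = max([len(extracted_mrz[key]), len(actual_mrz[key])])
--             for i in range(size):
--                 try:
--                     if extracted_mrz[key][i] != actual_mrz[key][i]: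
--                         true_negative += 1
--                 except:
--                     true_negative += 1
--
--     return true_negative
-- ===== SOURCE B (Python) =====
-- def count_inaccuracy(extracted_mrz, actual_mrz):
--     total = 0
--     for key in actual_mrz.keys():
--         e = extracted_mrz[key]
--         a = actual_mrz[key]
--         matches = len(set(enumerate(e)) & set(enumerate(a)))
--         total += max(len(e), len(a)) - matches
--     return total
-- ===== Notes on version B (the rewrite author's own statement) =====
-- stated objective: alternative
-- what changed: B drops the ragged max-length loop with try/except entirely: per key it counts AGREEING positions as the size of the set intersection of enumerate(e) and enumerate(a) (pairs (index,char)) and returns max(len(e),len(a)) minus that, the complement formulation; the equal-strings guard disappears since equal strings contribute 0.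
import Mathlib
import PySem

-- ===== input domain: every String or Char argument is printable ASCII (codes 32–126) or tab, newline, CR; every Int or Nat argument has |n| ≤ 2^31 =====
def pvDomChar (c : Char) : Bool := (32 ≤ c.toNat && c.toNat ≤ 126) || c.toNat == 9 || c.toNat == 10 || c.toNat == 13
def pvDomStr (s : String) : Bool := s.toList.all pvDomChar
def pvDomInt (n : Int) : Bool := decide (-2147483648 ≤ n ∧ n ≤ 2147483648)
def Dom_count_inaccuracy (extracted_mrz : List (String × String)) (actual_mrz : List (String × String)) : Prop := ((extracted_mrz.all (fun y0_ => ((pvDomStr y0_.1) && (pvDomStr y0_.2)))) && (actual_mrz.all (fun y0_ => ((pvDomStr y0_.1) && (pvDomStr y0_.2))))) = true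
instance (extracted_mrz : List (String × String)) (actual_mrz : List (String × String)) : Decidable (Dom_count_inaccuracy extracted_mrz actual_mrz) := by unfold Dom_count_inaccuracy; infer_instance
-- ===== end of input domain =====

-- B replaces A's ragged max-length index loop with try/except by the complement count:
-- per key, max(len e, len a) minus the size of set(enumerate(e)) & set(enumerate(a))
-- (objective: alternative — counts agreements via set intersection instead of mismatches).

-- ===== PORT A =====
def count_inaccuracy (extracted_mrz : List (String × String)) (actual_mrz : List (String × String)) : Int :=
  let ex := PySem.Dict.ofList extracted_mrz
  let ac := PySem.Dict.ofList actual_mrz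
  (PySem.Dict.keys ac).foldl (fun true_negative key =>
    -- extracted_mrz[key] / actual_mrz[key]; a missing key (KeyError) is excluded by Pre_
    if (ex.get? key).getD "" == (ac.get? key).getD "" then
      true_negative + 0
    else
      let size := max (PySem.Str.len ((ex.get? key).getD "")) (PySem.Str.len ((ac.get? key).getD ""))
      (PySem.List.pyRange 0 size 1).foldl (fun tn i =>
        -- try: compare e[i], a[i]; any IndexError falls into 'except: tn += 1'
        match PySem.Str.pyGet? ((ex.get? key).getD "") i, PySem.Str.pyGet? ((ac.get? key).getD "") i with
        | some ce, some ca => if ce != ca then tn + 1 else tn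
        | _, _ => tn + 1) true_negative) 0

-- ===== PORT B =====
def count_inaccuracy_alt (extracted_mrz : List (String × String)) (actual_mrz : List (String × String)) : Int :=
  let ex := PySem.Dict.ofList extracted_mrz
  let ac := PySem.Dict.ofList actual_mrz
  (PySem.Dict.keys ac).foldl (fun total key =>
    let e := (ex.get? key).getD ""
    let a := (ac.get? key).getD ""
    let nmatch := PySem.Set.len (PySem.Set.inter
        (PySem.Set.ofList (PySem.List.enumerate e.toList))
        (PySem.Set.ofList (PySem.List.enumerate a.toList)))
    total + (max (PySem.Str.len e) (PySem.Str.len a) - nmatch)) 0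

-- ===== PRECONDITION & SPEC =====
-- Pre_ excludes exactly the inputs where Python A raises KeyError: a key of actual_mrz absent from extracted_mrz.
def Pre_count_inaccuracy (extracted_mrz : List (String × String)) (actual_mrz : List (String × String)) : Prop :=
  ∀ k ∈ actual_mrz.map Prod.fst, k ∈ extracted_mrz.map Prod.fst
instance (extracted_mrz : List (String × String)) (actual_mrz : List (String × String)) : Decidable (Pre_count_inaccuracy extracted_mrz actual_mrz) := by unfold Pre_count_inaccuracy; infer_instance

def pvWitness_count_inaccuracy : (List (String × String)) × (List (String × String)) :=
  ([("number", "X123"), ("name", "DOE<JOHN")], [("number", "X124Z"), ("name", "DOE<JOHN")])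

def Spec_count_inaccuracy (extracted_mrz : List (String × String)) (actual_mrz : List (String × String)) (out : Int) : Prop := out = count_inaccuracy_alt extracted_mrz actual_mrz
instance (extracted_mrz : List (String × String)) (actual_mrz : List (String × String)) (out : Int) : Decidable (Spec_count_inaccuracy extracted_mrz actual_mrz out) := by unfold Spec_count_inaccuracy; infer_instance

-- ===== CLAIM (what is proved, stated in full; the proofs are below) =====
def Claim_equal_count_inaccuracy : Prop := ∀ (extracted_mrz : List (String × String)) (actual_mrz : List (String × String)), Dom_count_inaccuracy extracted_mrz actual_mrz → Pre_count_inaccuracy extracted_mrz actual_mrz → Spec_count_inaccuracy extracted_mrz actual_mrz (count_inaccuracy extracted_mrz actual_mrz)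

-- ===== LEMMAS AND PROOFS =====

-- a fold that always adds 1 adds the length of the range
theorem pv_const_sum (n : Nat) (tn : Int) :
    (List.range n).foldl (fun (tn : Int) (_ : Nat) => tn + 1) tn = tn + n := by
  rw [PySem.List.foldl_add (g := fun (_ : Nat) => (1 : Int))]
  simp

-- A's inner ragged loop over range(max(len e, len a)) computes the common-prefix
-- mismatch count plus the absolute length difference.
theorem pv_core (el al : List Char) (n : Nat) (hn : n = max el.length al.length) (tn : Int) :
    (List.range n).foldl (fun tn k =>
        match el[k]?, al[k]? with
        | some ce, some ca => if ce != ca then tn + 1 else tn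
        | _, _ => tn + 1) tn
      = tn + ((el.zip al).countP (fun p => p.1 != p.2) : Int)
           + (((el.length : Int) - (al.length : Int)).natAbs : Int) := by
  induction el generalizing al n tn with
  | nil =>
      subst hn
      rw [PySem.List.foldl_congr_mem
        (g := fun (tn : Int) (_ : Nat) => tn + 1)
        (h := by intro acc k _; simp), pv_const_sum]
      simp
  | cons ce el ih =>
      cases al with
      | nil =>
          subst hn
          rw [PySem.List.foldl_congr_mem
            (g := fun (tn : Int) (_ : Nat) => tn + 1)
            (h := by intro acc k _; cases h : (ce :: el)[k]? <;> simp), pv_const_sum]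
          simp
          rw [abs_of_nonneg (by positivity)]
      | cons ca al =>
          have hn' : n = (max el.length al.length) + 1 := by simp at hn; omega
          subst hn'
          rw [List.range_succ_eq_map, List.foldl_cons, List.foldl_map]
          simp only [List.getElem?_cons_succ, List.getElem?_cons_zero]
          rw [ih al _ rfl]
          simp only [List.zip_cons_cons, List.countP_cons, List.length_cons]
          have h : (((el.length + 1 : Nat)) : Int) - (((al.length + 1 : Nat)) : Int)
              = (el.length : Int) - al.length := by push_cast; ring
          rw [h]
          split_ifs with h1 <;> push_cast <;> ring

-- enumerate has pairwise-distinct indices, hence no duplicate pairs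
theorem pv_nodup_enum {α : Type} (xs : List α) (s : Int) :
    (PySem.List.enumerate xs s).Nodup := by
  have := PySem.List.pairwise_lt_enumerate xs s
  exact List.Pairwise.imp (fun h => by intro he; subst he; exact lt_irrefl _ h) this

-- the size of set(enumerate(el)) & set(enumerate(al)) is the number of agreeing
-- positions in the common prefix
theorem pv_inter_enum (el al : List Char) (s : Int) :
    ((PySem.Set.ofList (PySem.List.enumerate el s)).filter
        (fun p => (PySem.Set.ofList (PySem.List.enumerate al s)).contains p)).length
      = (el.zip al).countP (fun p => p.1 == p.2) := by
  rw [PySem.Set.ofList_eq_self_of_nodup _ (pv_nodup_enum el s),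
      PySem.Set.ofList_eq_self_of_nodup _ (pv_nodup_enum al s),
      ← List.countP_eq_length_filter]
  induction el generalizing al s with
  | nil => simp [PySem.List.enumerate]
  | cons e el ih =>
      cases al with
      | nil =>
          rw [List.countP_eq_zero.2]
          · simp
          · intro p hp
            simp [PySem.List.enumerate]
      | cons a al =>
          rw [PySem.List.enumerate_cons, PySem.List.enumerate_cons, List.countP_cons]
          have htail : (PySem.List.enumerate el (s + 1)).countP
                (fun p => ((s, a) :: PySem.List.enumerate al (s + 1)).contains p)
              = (PySem.List.enumerate el (s + 1)).countP
                (fun p => (PySem.List.enumerate al (s + 1)).contains p) := by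
            apply List.countP_congr
            intro p hp
            rw [PySem.List.mem_enumerate_iff] at hp
            obtain ⟨k, hk, rfl⟩ := hp
            simp only [List.contains_cons]
            have : ((s + 1 + (k : Int), el[k]) == (s, a)) = false := by
              rw [beq_eq_false_iff_ne]
              intro hne
              have := congrArg Prod.fst hne
              simp at this
              omega
            rw [this, Bool.false_or]
          have hhead : (((s, e) : Int × Char) ∈ (s, a) :: PySem.List.enumerate al (s + 1))
              ↔ e = a := by
            constructor
            · intro h
              rcases List.mem_cons.1 h with h | h
              · exact (Prod.mk.injEq .. ▸ h).2
              · rw [PySem.List.mem_enumerate_iff] at h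
                obtain ⟨k, hk, hp⟩ := h
                have := congrArg Prod.fst hp
                simp at this
                omega
            · intro h; subst h; exact List.mem_cons_self ..
          simp only [PySem.Set.contains_eq_listContains] at ih ⊢
          rw [htail, ih al (s + 1)]
          simp only [List.zip_cons_cons, List.countP_cons]
          by_cases h : e = a
          · simp only [List.contains_eq_mem, h]
            simp
          · have hm : (decide (((s, e) : Int × Char) ∈ (s, a) :: PySem.List.enumerate al (s + 1))) = false := by
              simp [hhead, h]
            simp only [List.contains_eq_mem, hm]
            simp [h]

-- on zip of a list with itself every pair agrees
theorem pv_zip_self (l : List Char) : (l.zip l).countP (fun p => p.1 == p.2) = l.length := by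
  induction l with
  | nil => simp
  | cons x l ih => simp [ih]

-- A's inner loop, stated on the strings, equals the mismatch + length-difference form
theorem pv_inner (e a : String) (tn : Int) :
    (PySem.List.pyRange 0 (max (PySem.Str.len e) (PySem.Str.len a)) 1).foldl (fun tn i =>
        match PySem.Str.pyGet? e i, PySem.Str.pyGet? a i with
        | some ce, some ca => if ce != ca then tn + 1 else tn
        | _, _ => tn + 1) tn
      = tn + ((e.toList.zip a.toList).countP (fun p => p.1 != p.2) : Int)
           + (((e.toList.length : Int) - (a.toList.length : Int)).natAbs : Int) := by
  rw [PySem.List.pyRange_one, List.foldl_map]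
  rw [PySem.List.foldl_congr_mem
    (g := fun (tn : Int) (k : Nat) =>
        match e.toList[k]?, a.toList[k]? with
        | some ce, some ca => if ce != ca then tn + 1 else tn
        | _, _ => tn + 1)
    (h := by intro acc k _; simp)]
  have hsz : ((max (PySem.Str.len e) (PySem.Str.len a) - 0).toNat)
      = max e.toList.length a.toList.length := by
    simp [PySem.Str.len_eq]
    omega
  rw [hsz]
  exact pv_core e.toList a.toList _ rfl tn

-- the per-key step of port A equals the per-key step of port B
theorem pv_step (ex ac : PySem.Dict String String) (tn : Int) (key : String) :
    (if ((ex.get? key).getD "" == (ac.get? key).getD "") then tn + 0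
     else
       (PySem.List.pyRange 0
          (max (PySem.Str.len ((ex.get? key).getD "")) (PySem.Str.len ((ac.get? key).getD ""))) 1).foldl
         (fun tn i =>
           match PySem.Str.pyGet? ((ex.get? key).getD "") i, PySem.Str.pyGet? ((ac.get? key).getD "") i with
           | some ce, some ca => if ce != ca then tn + 1 else tn
           | _, _ => tn + 1) tn)
    = tn + (max (PySem.Str.len ((ex.get? key).getD "")) (PySem.Str.len ((ac.get? key).getD ""))
          - PySem.Set.len (PySem.Set.inter
              (PySem.Set.ofList (PySem.List.enumerate ((ex.get? key).getD "").toList))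
              (PySem.Set.ofList (PySem.List.enumerate ((ac.get? key).getD "").toList)))) := by
  set e := (ex.get? key).getD "" with he
  set a := (ac.get? key).getD "" with ha
  have hmatch : PySem.Set.len (PySem.Set.inter
        (PySem.Set.ofList (PySem.List.enumerate e.toList))
        (PySem.Set.ofList (PySem.List.enumerate a.toList)))
      = ((e.toList.zip a.toList).countP (fun p => p.1 == p.2) : Int) := by
    show (((PySem.Set.ofList (PySem.List.enumerate e.toList)).filter
        (fun p => (PySem.Set.ofList (PySem.List.enumerate a.toList)).contains p)).length : Int) = _
    exact congrArg _ (pv_inter_enum e.toList a.toList 0)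
  have hcount : (e.toList.zip a.toList).countP (fun p => p.1 == p.2)
        + (e.toList.zip a.toList).countP (fun p => p.1 != p.2)
      = min e.toList.length a.toList.length := by
    rw [← List.length_zip]
    rw [List.length_eq_countP_add_countP (p := fun (p : Char × Char) => p.1 == p.2) (l := e.toList.zip a.toList)]
    congr 1
    apply List.countP_congr
    intro p _
    simp [bne]
  have hlen_e : PySem.Str.len e = (e.toList.length : Int) := by simp [PySem.Str.len_eq]
  have hlen_a : PySem.Str.len a = (a.toList.length : Int) := by simp [PySem.Str.len_eq]
  by_cases h : (e == a) = true
  · rw [if_pos h]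
    have heq : e = a := by simpa using h
    rw [hmatch, heq, hlen_a, pv_zip_self]
    simp
  · rw [if_neg h, pv_inner e a tn, hmatch, hlen_e, hlen_a]
    have hc := hcount
    omega

-- ===== VERDICT (by name: the statement is the Claim_ definition above) =====
theorem count_inaccuracy_spec : Claim_equal_count_inaccuracy := by
  intro extracted_mrz actual_mrz _ _
  unfold Spec_count_inaccuracy count_inaccuracy count_inaccuracy_alt
  exact PySem.List.foldl_congr_mem
    (l := (PySem.Dict.ofList actual_mrz).keys) (init := (0 : Int))
    (h := fun acc key _ => pv_step (PySem.Dict.ofList extracted_mrz) (PySem.Dict.ofList actual_mrz) acc key)
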